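-- pv_equiv track=rewrite | github.com/elanorstarksby/aoc2024 | day08/day08.py | map_nodes
-- ===== SOURCE A (Python) =====
-- def map_nodes(values):
--     nodes = {}
--     for ri, r in enumerate(values):
--         for ci, c in enumerate(r):
--             if c != ".":
--                 if c not in nodes:
--                     nodes[c] = []
--                 nodes[c].append((ri, ci))
--     return nodes
-- ===== SOURCE B (Python) =====
-- def map_nodes(values):
--     cells = [(c, (ri, ci)) for ri, r in enumerate(values) for ci, c in enumerate(r) if c != "."]
--     keys = list(dict.fromkeys(c for c, _ in cells))
--     return {k: [p for c, p in cells if c == k] for k in keys}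
-- ===== Notes on version B (the rewrite author's own statement) =====
-- stated objective: alternative
-- what changed: Replaces the incremental dict-building loop (membership test + append per cell) by a flat comprehension of (char, coord) cells, an ordered key dedup via dict.fromkeys, and one grouping comprehension filtering the flat list per key.
import Mathlib
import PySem

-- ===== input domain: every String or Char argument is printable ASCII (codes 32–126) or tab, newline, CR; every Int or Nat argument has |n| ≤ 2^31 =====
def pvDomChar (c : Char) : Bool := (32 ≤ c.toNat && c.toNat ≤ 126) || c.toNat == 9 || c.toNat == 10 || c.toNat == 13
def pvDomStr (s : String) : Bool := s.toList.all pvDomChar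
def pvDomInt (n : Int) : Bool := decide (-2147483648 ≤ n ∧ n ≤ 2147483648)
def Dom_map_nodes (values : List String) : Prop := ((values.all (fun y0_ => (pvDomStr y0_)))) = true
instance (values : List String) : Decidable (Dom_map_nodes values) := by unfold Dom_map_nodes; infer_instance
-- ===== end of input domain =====

-- B replaces A's incremental dict-building loop by a flat cell list, an ordered key dedup
-- and one per-key grouping pass (alternative decomposition, same return value).

-- ===== PORT A =====
-- literal port of A: nested enumerate loops building a dict, 'c not in nodes' guard then append
def map_nodes (values : List String) : List (String × List (Int × Int)) :=
  ((PySem.List.enumerate values).foldl (fun nodes rr =>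
    (PySem.List.enumerate rr.2.toList).foldl (fun nodes cc =>
      if cc.2 ≠ '.' then
        let k := String.ofList [cc.2]
        let nodes' := if nodes.contains k then nodes else nodes.insert k ([] : List (Int × Int))
        nodes'.modify k [] (fun l => l ++ [(rr.1, cc.1)])
      else nodes) nodes) PySem.Dict.empty).items

-- ===== PORT B =====
-- the flat list of (char, (ri, ci)) cells with c ≠ '.', in scan order
def pvCells (values : List String) : List (String × (Int × Int)) :=
  (PySem.List.enumerate values).flatMap (fun rr =>
    ((PySem.List.enumerate rr.2.toList).filter (fun cc => cc.2 ≠ '.')).map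
      (fun cc => (String.ofList [cc.2], (rr.1, cc.1))))

def map_nodes_alt (values : List String) : List (String × List (Int × Int)) :=
  let cells := pvCells values
  (PySem.List.dedup (cells.map Prod.fst)).map
    (fun k => (k, (cells.filter (fun cp => cp.1 == k)).map Prod.snd))

-- ===== PRECONDITION & SPEC =====
def Spec_map_nodes (values : List String) (out : List (String × List (Int × Int))) : Prop := out = map_nodes_alt values
instance (values : List String) (out : List (String × List (Int × Int))) : Decidable (Spec_map_nodes values out) := by unfold Spec_map_nodes; infer_instance

-- ===== CLAIM (what is proved, stated in full; the proofs are below) =====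
def Claim_equal_map_nodes : Prop := ∀ (values : List String), Dom_map_nodes values → Spec_map_nodes values (map_nodes values)

-- ===== LEMMAS AND PROOFS =====

-- A's 'if c not in nodes: nodes[c] = []' followed by append collapses to a single modify step
theorem pv_setdefault_modify (d : PySem.Dict String (List (Int × Int))) (k : String) (p : Int × Int) :
    ((if d.contains k then d else d.insert k ([] : List (Int × Int))).modify k [] (fun l => l ++ [p]))
      = d.modify k [] (fun l => l ++ [p]) := by
  by_cases h : d.contains k
  · simp [h]
  · have h' : d.contains k = false := by simpa using h
    simp [PySem.Dict.modify, h', PySem.Dict.getD_insert_self, PySem.Dict.insert_insert_self,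
      PySem.Dict.getD_of_not_contains]

-- A's nested loop equals the single modify-fold over the flat cell list
theorem pv_fold_eq (values : List String) :
    ((PySem.List.enumerate values).foldl (fun nodes rr =>
      (PySem.List.enumerate rr.2.toList).foldl (fun nodes cc =>
        if cc.2 ≠ '.' then
          let k := String.ofList [cc.2]
          let nodes' := if nodes.contains k then nodes else nodes.insert k ([] : List (Int × Int))
          nodes'.modify k [] (fun l => l ++ [(rr.1, cc.1)])
        else nodes) nodes) PySem.Dict.empty)
    = (pvCells values).foldl (fun d p => d.modify p.1 [] (fun l => l ++ [p.2])) PySem.Dict.empty := by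
  unfold pvCells
  rw [List.foldl_flatMap]
  simp only [List.foldl_map, List.foldl_filter, pv_setdefault_modify, decide_eq_true_eq]

-- ===== VERDICT (by name: the statement is the Claim_ definition above) =====
theorem map_nodes_spec : Claim_equal_map_nodes := by
  intro values _
  unfold Spec_map_nodes map_nodes map_nodes_alt
  rw [pv_fold_eq]
  have hnd : ((pvCells values).foldl (fun d p => d.modify p.1 [] (fun l => l ++ [p.2]))
      PySem.Dict.empty).keys.Nodup := by
    exact PySem.Dict.nodup_keys_foldl_modify_key _ Prod.fst _ _ _ PySem.Dict.nodup_keys_empty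
  rw [PySem.Dict.items_eq_map_keys _ hnd ([] : List (Int × Int))]
  rw [PySem.Dict.keys_foldl_modify_key]
  simp only [PySem.Dict.getD_foldl_modify_append, PySem.Dict.getD_empty, List.nil_append,
    PySem.Dict.keys_empty, PySem.List.dedup_eq_ofList]
  rfl
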